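-- pv_equiv track=rewrite | github.com/tudragon154203/scrapling-fastapi | .github/workflows/scripts/bots/opencode/build-comment.py | _collapse_carriage_returns
-- ===== SOURCE A (Python) =====
-- def _collapse_carriage_returns(text: str) -> str:
--     text = text.replace("\r\n", "\n")
--     lines: list[str] = []
--     current: list[str] = []
--
--     for char in text:
--         if char == "\r":
--             current = []
--             continue
--         if char == "\n":
--             lines.append("".join(current))
--             current = []
--             continue
--         current.append(char)
--
--     if current:
--         lines.append("".join(current))
--
--     return "\n".join(lines)
-- ===== SOURCE B (Python) =====
-- def _collapse_carriage_returns(text: str) -> str: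
--     text = text.replace("\r\n", "\n")
--     lines = [seg.split("\r")[-1] for seg in text.split("\n")]
--     if lines and lines[-1] == "":
--         lines.pop()
--     return "\n".join(lines)
-- ===== Notes on version B (the rewrite author's own statement) =====
-- stated objective: simpler
-- what changed: Replaced the char-by-char buffer-accumulation loop with a two-level split decomposition: split the normalized text into lines at newlines, keep the part after the last carriage return of each line via split-and-take-last, drop one trailing empty line, join; the bulk work moves into C-level str.split, measured ~4x faster.
import Mathlib
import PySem

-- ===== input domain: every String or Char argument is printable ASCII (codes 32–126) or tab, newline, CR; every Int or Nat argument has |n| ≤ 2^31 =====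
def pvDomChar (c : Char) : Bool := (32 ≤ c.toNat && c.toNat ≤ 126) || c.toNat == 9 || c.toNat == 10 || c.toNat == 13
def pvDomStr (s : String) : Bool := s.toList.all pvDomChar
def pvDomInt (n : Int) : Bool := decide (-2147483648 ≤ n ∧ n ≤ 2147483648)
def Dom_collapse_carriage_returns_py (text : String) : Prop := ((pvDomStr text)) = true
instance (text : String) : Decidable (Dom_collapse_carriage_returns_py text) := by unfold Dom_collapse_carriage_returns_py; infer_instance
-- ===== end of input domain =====

-- B replaces A's char-by-char buffer loop by a two-level split decomposition (split into lines, keep the part after the last CR of each, drop one trailing empty line); simpler, and measured faster in a timing run.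

-- ===== PORT A =====
def pvStepA (st : List (List Char) × List Char) (c : Char) : List (List Char) × List Char :=
  if c = '\r' then (st.1, [])
  else if c = '\n' then (st.1 ++ [st.2], [])
  else (st.1, st.2 ++ [c])

def collapse_carriage_returns_py (text : String) : String :=
  let cs := PySem.Chars.replace text.toList ['\r', '\n'] ['\n']
  let st := cs.foldl pvStepA ([], [])
  let lines := if st.2 ≠ [] then st.1 ++ [st.2] else st.1
  String.mk (PySem.Chars.join ['\n'] lines)

-- ===== PORT B =====
-- seg.split("\r")[-1]: single-character str.split is exactly Mathlib's List.splitOn on the char list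
def pvLastSeg (seg : List Char) : List Char := (List.splitOn '\r' seg).getLastD []

def collapse_carriage_returns_py_alt (text : String) : String :=
  let cs := PySem.Chars.replace text.toList ['\r', '\n'] ['\n']
  let lines := (List.splitOn '\n' cs).map pvLastSeg
  let lines := if lines ≠ [] ∧ lines.getLast? = some [] then lines.dropLast else lines
  String.mk (PySem.Chars.join ['\n'] lines)

-- ===== PRECONDITION & SPEC =====
def Spec_collapse_carriage_returns_py (text : String) (out : String) : Prop := out = collapse_carriage_returns_py_alt text
instance (text : String) (out : String) : Decidable (Spec_collapse_carriage_returns_py text out) := by unfold Spec_collapse_carriage_returns_py; infer_instance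

-- ===== CLAIM (what is proved, stated in full; the proofs are below) =====
def Claim_equal_collapse_carriage_returns_py : Prop := ∀ (text : String), Dom_collapse_carriage_returns_py text → Spec_collapse_carriage_returns_py text (collapse_carriage_returns_py text)

-- ===== LEMMAS AND PROOFS =====

-- common recursive description of the produced lines: cur is the pending buffer
def pvLines (cur : List Char) : List Char → List (List Char)
  | [] => if cur = [] then [] else [cur]
  | c :: t =>
    if c = '\r' then pvLines [] t
    else if c = '\n' then cur :: pvLines [] t
    else pvLines (cur ++ [c]) t

def pvTrim (xs : List (List Char)) : List (List Char) :=
  if xs ≠ [] ∧ xs.getLast? = some [] then xs.dropLast else xs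

theorem pvFoldA (cs : List Char) : ∀ (L : List (List Char)) (cur : List Char),
    (let st := cs.foldl pvStepA (L, cur);
     if st.2 ≠ [] then st.1 ++ [st.2] else st.1) = L ++ pvLines cur cs := by
  induction cs with
  | nil =>
    intro L cur
    by_cases h : cur = [] <;> simp [pvLines, h]
  | cons c t ih =>
    intro L cur
    by_cases h1 : c = '\r'
    · simpa [pvLines, h1, pvStepA] using ih L []
    · by_cases h2 : c = '\n'
      · have := ih (L ++ [cur]) []
        simp [pvLines, h1, h2, pvStepA] at this ⊢
        simpa [List.append_assoc] using this
      · simpa [pvLines, h1, h2, pvStepA] using ih L (cur ++ [c])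

theorem pvSplitOn_nosep (pre : List Char) (h : '\n' ∉ pre) :
    List.splitOn '\n' pre = [pre] := by
  induction pre with
  | nil => simp [List.splitOn]
  | cons c t ih =>
    simp only [List.mem_cons, not_or] at h
    have := ih h.2
    simp [List.splitOn, List.splitOnP_cons, Ne.symm h.1] at this ⊢
    simp [this]

theorem pvSplitOn_append_nosep (pre : List Char) (h : '\n' ∉ pre) (xs : List Char) :
    List.splitOn '\n' (pre ++ xs) = (List.splitOn '\n' xs).modifyHead (pre ++ ·) := by
  induction pre with
  | nil =>
    rcases hx : List.splitOn '\n' xs with _ | ⟨x0, xr⟩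
    · exact absurd hx (List.splitOnP_ne_nil _ _)
    · simp [hx]
  | cons c t ih =>
    simp only [List.mem_cons, not_or] at h
    rcases hx : List.splitOn '\n' xs with _ | ⟨x0, xr⟩
    · exact absurd hx (List.splitOnP_ne_nil _ _)
    · have ht := ih h.2
      rw [hx] at ht
      simp [List.splitOn, List.splitOnP_cons, Ne.symm h.1] at ht ⊢
      simp [ht]

theorem pvLastSeg_no_cr (xs : List Char) (h : '\r' ∉ xs) : pvLastSeg xs = xs := by
  unfold pvLastSeg
  rw [show List.splitOn '\r' xs = [xs] from ?_]
  · rfl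
  · induction xs with
    | nil => simp [List.splitOn]
    | cons c t ih =>
      simp only [List.mem_cons, not_or] at h
      have := ih h.2
      simp [List.splitOn, List.splitOnP_cons, Ne.symm h.1] at this ⊢
      simp [this]

theorem pvGetLastD_irrel (l : List (List Char)) (h : l ≠ []) (a b : List Char) :
    l.getLastD a = l.getLastD b := by
  rcases l with _ | ⟨x, t⟩
  · exact absurd rfl h
  · rw [List.getLastD_cons, List.getLastD_cons]

theorem pvSplitLen2 (x y : List Char) :
    2 ≤ (List.splitOn '\r' (x ++ '\r' :: y)).length := by
  induction x with
  | nil =>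
    have h2 : 0 < (List.splitOnP (fun x => x == '\r') y).length :=
      List.length_pos_iff.mpr (List.splitOnP_ne_nil _ _)
    simp only [List.nil_append, List.splitOn, List.splitOnP_cons, beq_self_eq_true, if_true,
      List.length_cons]
    omega
  | cons c t ih =>
    by_cases hc : c = '\r'
    · subst hc
      have h2 : 0 < (List.splitOnP (fun x => x == '\r') (t ++ '\r' :: y)).length :=
        List.length_pos_iff.mpr (List.splitOnP_ne_nil _ _)
      simp only [List.cons_append, List.splitOn, List.splitOnP_cons, beq_self_eq_true, if_true,
        List.length_cons]
      omega
    · simp only [List.cons_append, List.splitOn, List.splitOnP_cons,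
        if_neg (by simp [hc] : ¬ ((c == '\r') = true)), List.length_modifyHead]
      simpa [List.splitOn] using ih

theorem pvLastSeg_append_cr (x y : List Char) : pvLastSeg (x ++ '\r' :: y) = pvLastSeg y := by
  induction x with
  | nil =>
    rcases hy : List.splitOn '\r' y with _ | ⟨s0, rest⟩
    · exact absurd hy (List.splitOnP_ne_nil _ _)
    · have h1 : List.splitOn '\r' ('\r' :: y) = [] :: s0 :: rest := by
        simp only [List.splitOn] at hy ⊢
        rw [List.splitOnP_cons, if_pos (by simp), hy]
      unfold pvLastSeg
      rw [List.nil_append, h1, hy, List.getLastD_cons, List.getLastD_cons]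
  | cons c t ih =>
    by_cases hc : c = '\r'
    · subst hc
      rcases hs : List.splitOn '\r' (t ++ '\r' :: y) with _ | ⟨s0, rest⟩
      · exact absurd hs (List.splitOnP_ne_nil _ _)
      · have h1 : List.splitOn '\r' ('\r' :: (t ++ '\r' :: y)) = [] :: s0 :: rest := by
          simp only [List.splitOn] at hs ⊢
          rw [List.splitOnP_cons, if_pos (by simp), hs]
        unfold pvLastSeg at ih ⊢
        rw [List.cons_append, h1, List.getLastD_cons, ← hs]
        exact ih
    · rcases hs : List.splitOn '\r' (t ++ '\r' :: y) with _ | ⟨s0, rest⟩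
      · exact absurd hs (List.splitOnP_ne_nil _ _)
      · have hrest : rest ≠ [] := by
          have h2 := pvSplitLen2 t y
          rw [hs] at h2
          intro hr; subst hr; simp at h2
        have hsplit : List.splitOn '\r' (c :: (t ++ '\r' :: y)) = (c :: s0) :: rest := by
          simp only [List.splitOn] at hs ⊢
          rw [List.splitOnP_cons, if_neg (by simp [hc]), hs]
          rfl
        unfold pvLastSeg at ih ⊢
        rw [hs] at ih
        rw [List.getLastD_cons] at ih
        rw [List.cons_append, hsplit, List.getLastD_cons,
          pvGetLastD_irrel rest hrest (c :: s0) s0]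
        exact ih

theorem pvTrim_cons (a : List Char) (l : List (List Char)) (h : l ≠ []) :
    pvTrim (a :: l) = a :: pvTrim l := by
  unfold pvTrim
  rcases l with _ | ⟨b, t⟩
  · exact absurd rfl h
  · by_cases hl : (b :: t).getLast? = some [] <;> simp [hl]

theorem pvMainB (cs : List Char) : ∀ (cur : List Char), '\r' ∉ cur → '\n' ∉ cur →
    pvTrim ((List.splitOn '\n' (cur ++ cs)).map pvLastSeg) = pvLines cur cs := by
  induction cs with
  | nil =>
    intro cur hr hn
    rw [List.append_nil, pvSplitOn_nosep cur hn]
    by_cases h : cur = []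
    · subst h
      simp [pvLines, pvTrim, pvLastSeg, List.splitOn]
    · simp [pvLines, h, pvTrim, pvLastSeg_no_cr cur hr]
  | cons c t ih =>
    intro cur hr hn
    by_cases h1 : c = '\r'
    · subst h1
      rcases hs : List.splitOn '\n' t with _ | ⟨h0, rest⟩
      · exact absurd hs (List.splitOnP_ne_nil _ _)
      · have hpre : '\n' ∉ cur ++ ['\r'] := by simp [hn]
        have := pvSplitOn_append_nosep (cur ++ ['\r']) hpre t
        rw [show cur ++ '\r' :: t = (cur ++ ['\r']) ++ t by simp] 
        rw [this, hs]
        have ihz := ih [] (by simp) (by simp)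
        simp only [List.nil_append] at ihz
        rw [hs] at ihz
        simp only [List.modifyHead, List.map, pvLines]
        rw [show (cur ++ ['\r']) ++ h0 = cur ++ '\r' :: h0 by simp]
        rw [pvLastSeg_append_cr]
        simpa using ihz
    · by_cases h2 : c = '\n'
      · subst h2
        rw [pvSplitOn_append_nosep cur hn ('\n' :: t)]
        rcases hs : List.splitOn '\n' t with _ | ⟨h0, rest⟩
        · exact absurd hs (List.splitOnP_ne_nil _ _)
        · have hsp : List.splitOn '\n' ('\n' :: t) = [] :: h0 :: rest := by
            simp [List.splitOn, List.splitOnP_cons] at hs ⊢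
            simp [hs]
          rw [hsp]
          have ihz := ih [] (by simp) (by simp)
          simp only [List.nil_append] at ihz
          rw [hs] at ihz
          simp only [List.modifyHead, List.map, List.append_nil]
          rw [pvTrim_cons _ _ (by simp)]
          simp [pvLines, pvLastSeg_no_cr cur hr]
          simpa using ihz
      · have ihc := ih (cur ++ [c]) (by simp [hr]; exact fun h => h1 h.symm) (by simp [hn]; exact fun h => h2 h.symm)
        rw [show cur ++ c :: t = (cur ++ [c]) ++ t by simp] 
        rw [show pvLines cur (c :: t) = pvLines (cur ++ [c]) t by simp [pvLines, h1, h2]]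
        exact ihc

-- ===== VERDICT (by name: the statement is the Claim_ definition above) =====
theorem collapse_carriage_returns_py_spec : Claim_equal_collapse_carriage_returns_py := by
  intro text _
  unfold Spec_collapse_carriage_returns_py collapse_carriage_returns_py collapse_carriage_returns_py_alt
  have hA := pvFoldA (PySem.Chars.replace text.toList ['\r', '\n'] ['\n']) [] []
  have hB := pvMainB (PySem.Chars.replace text.toList ['\r', '\n'] ['\n']) [] (by simp) (by simp)
  simp only [List.nil_append] at hA hB
  simp only []
  rw [hA, ← hB]
  rfl
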